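-- pv_equiv track=rewrite | github.com/goodursus/rotation_champs | player_matching.py | snake_algorithm
-- ===== SOURCE A (Python) =====
-- def snake_algorithm(player_ids, num_courts):
--     """
--     Реализует алгоритм "змейки" для распределения игроков по кортам
--     Порядок распределения:
--     Корт 1, Корт 2, ..., Корт N, Корт N, ..., Корт 2, Корт 1, Корт 1, ...
--
--     Parameters:
--     - player_ids: Список ID игроков, отсортированных по рейтингу (от высокого к низкому)
--     - num_courts: Количество кортов
--
--     Returns:
--     - Список списков ID игроков для каждого корта
--     """
--     if num_courts == 0:
--         return []
--
--     # Инициализируем пустые списки для каждого корта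
--     court_players = [[] for _ in range(num_courts)]
--
--     # Определяем количество игроков для полных кортов (по 4 на корт)
--     num_players_for_courts = num_courts * 4
--
--     # Обрезаем список игроков до необходимого количества
--     players_to_distribute = player_ids[:num_players_for_courts]
--
--     # Распределяем игроков "змейкой"
--     direction = 1  # 1 - вперед, -1 - назад
--     court_idx = 0
--
--     for i, player_id in enumerate(players_to_distribute):
--         court_players[court_idx].append(player_id)
--
--         # Изменяем направление, если достигли края
--         if court_idx == 0 and direction == -1:
--             direction = 1
--         elif court_idx == num_courts - 1 and direction == 1:
--             direction = -1
--         else: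
--             court_idx += direction
--
--     return court_players
-- ===== SOURCE B (Python) =====
-- def snake_algorithm(player_ids, num_courts):
--     """Snake distribution via a precomputed cyclic index pattern (one table, no direction state machine)."""
--     if num_courts == 0:
--         return []
--     pattern = list(range(num_courts)) + list(range(num_courts - 1, -1, -1))
--     court_players = [[] for _ in range(num_courts)]
--     for i, pid in enumerate(player_ids[:num_courts * 4]):
--         court_players[pattern[i % len(pattern)]].append(pid)
--     return court_players
-- ===== Notes on version B (the rewrite author's own statement) =====
-- stated objective: idiomatic
-- what changed: Replaces the per-step direction/court-index state machine with a precomputed cyclic snake index table (range(n) + reversed range(n)) indexed by i % (2n).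
import Mathlib
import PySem

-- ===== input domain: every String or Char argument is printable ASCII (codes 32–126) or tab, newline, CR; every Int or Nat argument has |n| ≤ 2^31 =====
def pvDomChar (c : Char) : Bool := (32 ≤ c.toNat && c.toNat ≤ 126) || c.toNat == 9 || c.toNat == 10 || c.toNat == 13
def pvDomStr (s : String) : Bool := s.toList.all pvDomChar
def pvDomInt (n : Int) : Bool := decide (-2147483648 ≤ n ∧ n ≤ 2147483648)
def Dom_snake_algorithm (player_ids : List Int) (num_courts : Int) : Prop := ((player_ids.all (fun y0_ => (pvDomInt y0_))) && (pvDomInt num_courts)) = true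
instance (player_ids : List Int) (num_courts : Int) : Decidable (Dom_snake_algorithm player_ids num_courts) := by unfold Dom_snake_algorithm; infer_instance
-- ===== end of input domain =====

-- B replaces A's per-step direction/court-index state machine with a precomputed cyclic
-- snake index table (range(n) + reversed range(n)) indexed by i % (2n); idiomatic, same cost.

-- ===== PORT A =====
-- court_players[idx].append(x); a no-op when idx is out of range (within Pre_ the index is always in range)
def pvAppendAt (cps : List (List Int)) (idx : Int) (x : Int) : List (List Int) :=
  cps.mapIdx (fun j c => if (j : Int) = idx then c ++ [x] else c)

def snakeLoopA (n : Int) : List Int → List (List Int) → Int → Int → List (List Int)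
  | [], cps, _, _ => cps
  | pid :: rest, cps, direction, court_idx =>
    let cps' := pvAppendAt cps court_idx pid
    if court_idx = 0 ∧ direction = -1 then
      snakeLoopA n rest cps' 1 court_idx
    else if court_idx = n - 1 ∧ direction = 1 then
      snakeLoopA n rest cps' (-1) court_idx
    else
      snakeLoopA n rest cps' direction (court_idx + direction)

def snake_algorithm (player_ids : List Int) (num_courts : Int) : List (List Int) :=
  if num_courts = 0 then []
  else
    let court_players := (PySem.List.pyRange 0 num_courts 1).map (fun _ => ([] : List Int))
    let players_to_distribute := PySem.List.slice player_ids none (some (num_courts * 4))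
    snakeLoopA num_courts players_to_distribute court_players 1 0

-- ===== PORT B =====
def snakeLoopB (pattern : List Int) : List Int → List (List Int) → Int → List (List Int)
  | [], cps, _ => cps
  | pid :: rest, cps, i =>
    snakeLoopB pattern rest
      (pvAppendAt cps (PySem.List.pyGetD pattern (PySem.Int.mod i (pattern.length : Int)) 0) pid)
      (i + 1)

def snake_algorithm_alt (player_ids : List Int) (num_courts : Int) : List (List Int) :=
  if num_courts = 0 then []
  else
    let pattern := PySem.List.pyRange 0 num_courts 1 ++ PySem.List.pyRange (num_courts - 1) (-1) (-1)
    let court_players := (PySem.List.pyRange 0 num_courts 1).map (fun _ => ([] : List Int))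
    snakeLoopB pattern (PySem.List.slice player_ids none (some (num_courts * 4))) court_players 0

-- ===== PRECONDITION & SPEC =====
-- Pre_ excludes exactly the inputs where A raises IndexError: num_courts < 0 while the
-- truncated list player_ids[:4*num_courts] is still non-empty (court_players is empty then).
def Pre_snake_algorithm (player_ids : List Int) (num_courts : Int) : Prop :=
  0 ≤ num_courts ∨ (player_ids.length : Int) + 4 * num_courts ≤ 0
instance (player_ids : List Int) (num_courts : Int) : Decidable (Pre_snake_algorithm player_ids num_courts) := by unfold Pre_snake_algorithm; infer_instance

def pvWitness_snake_algorithm : List Int × Int := ([10, 20, 30, 40, 50, 60, 70, 80, 90], 2)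

def Spec_snake_algorithm (player_ids : List Int) (num_courts : Int) (out : List (List Int)) : Prop := out = snake_algorithm_alt player_ids num_courts
instance (player_ids : List Int) (num_courts : Int) (out : List (List Int)) : Decidable (Spec_snake_algorithm player_ids num_courts out) := by unfold Spec_snake_algorithm; infer_instance

-- ===== CLAIM (what is proved, stated in full; the proofs are below) =====
def Claim_equal_snake_algorithm : Prop := ∀ (player_ids : List Int) (num_courts : Int), Dom_snake_algorithm player_ids num_courts → Pre_snake_algorithm player_ids num_courts → Spec_snake_algorithm player_ids num_courts (snake_algorithm player_ids num_courts)

-- ===== LEMMAS AND PROOFS =====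

-- the state of A's machine before step i, as a function of i % (2n)
def pvIdxOf (n : Int) (i : Nat) : Int :=
  if ((i % (2 * n.toNat) : Nat) : Int) < n then ((i % (2 * n.toNat) : Nat) : Int)
  else 2 * n - 1 - ((i % (2 * n.toNat) : Nat) : Int)

def pvDirOf (n : Int) (i : Nat) : Int :=
  if ((i % (2 * n.toNat) : Nat) : Int) < n then 1 else -1

theorem pattern_length (n : Int) (hn : 1 ≤ n) :
    (PySem.List.pyRange 0 n 1 ++ PySem.List.pyRange (n - 1) (-1) (-1)).length = 2 * n.toNat := by
  simp [PySem.List.length_pyRange_one, PySem.List.pyRange_neg_one]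
  omega

theorem pattern_get (n : Int) (hn : 1 ≤ n) (r : Nat) (hr : r < 2 * n.toNat) :
    PySem.List.pyGetD (PySem.List.pyRange 0 n 1 ++ PySem.List.pyRange (n - 1) (-1) (-1)) (r : Int) 0
      = (if (r : Int) < n then (r : Int) else 2 * n - 1 - (r : Int)) := by
  rw [PySem.List.pyGetD_natCast]
  rw [List.getD_eq_getElem?_getD, PySem.List.pyRange_one, PySem.List.pyRange_neg_one]
  by_cases h : (r : Int) < n
  · rw [List.getElem?_append_left (by simp; omega)]
    rw [List.getElem?_eq_getElem (by simp; omega)]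
    simp [h]
  · rw [List.getElem?_append_right (by simp; omega)]
    rw [List.getElem?_eq_getElem (by simp; omega)]
    simp [h]
    omega

theorem loop_eq (n : Int) (hn : 1 ≤ n) (players : List Int) :
    ∀ (i : Nat) (cps : List (List Int)),
      snakeLoopA n players cps (pvDirOf n i) (pvIdxOf n i)
        = snakeLoopB (PySem.List.pyRange 0 n 1 ++ PySem.List.pyRange (n - 1) (-1) (-1)) players cps (i : Nat) := by
  induction players with
  | nil => intro i cps; simp [snakeLoopA, snakeLoopB]
  | cons pid rest ih =>
    intro i cps
    have hL := pattern_length n hn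
    have hLpos : 0 < 2 * n.toNat := by omega
    have hrlt : i % (2 * n.toNat) < 2 * n.toNat := Nat.mod_lt _ hLpos
    have hmod : PySem.Int.mod (i : Int) (((PySem.List.pyRange 0 n 1 ++ PySem.List.pyRange (n - 1) (-1) (-1)).length : Nat) : Int)
        = ((i % (2 * n.toNat) : Nat) : Int) := by
      rw [hL]; exact_mod_cast PySem.Int.mod_natCast i (2 * n.toNat)
    have hget : PySem.List.pyGetD (PySem.List.pyRange 0 n 1 ++ PySem.List.pyRange (n - 1) (-1) (-1))
        (PySem.Int.mod (i : Int) (((PySem.List.pyRange 0 n 1 ++ PySem.List.pyRange (n - 1) (-1) (-1)).length : Nat) : Int)) 0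
        = pvIdxOf n i := by
      rw [hmod, pattern_get n hn _ hrlt]; rfl
    have hsucc : (i + 1) % (2 * n.toNat)
        = if i % (2 * n.toNat) + 1 = 2 * n.toNat then 0 else i % (2 * n.toNat) + 1 := by
      rw [Nat.add_mod, Nat.mod_eq_of_lt (show 1 < 2 * n.toNat by omega)]
      split_ifs with h
      · rw [h, Nat.mod_self]
      · exact Nat.mod_eq_of_lt (by omega)
    have hicast : ((i : Int) + 1) = ((i + 1 : Nat) : Int) := by push_cast; ring
    simp only [snakeLoopA, snakeLoopB, hget, hicast]
    have hdir : ∀ d x, d = pvDirOf n (i + 1) → x = pvIdxOf n (i + 1) →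
        snakeLoopA n rest (pvAppendAt cps (pvIdxOf n i) pid) d x
          = snakeLoopB (PySem.List.pyRange 0 n 1 ++ PySem.List.pyRange (n - 1) (-1) (-1)) rest (pvAppendAt cps (pvIdxOf n i) pid) ((i + 1 : Nat) : Int) := by
      intro d x hd hx; rw [hd, hx]; exact ih (i + 1) _
    by_cases h1 : ((i % (2 * n.toNat) : Nat) : Int) < n
    · have hs : (i + 1) % (2 * n.toNat) = i % (2 * n.toNat) + 1 := by
        rw [hsucc, if_neg (by omega)]
      by_cases h2 : ((i % (2 * n.toNat) : Nat) : Int) = n - 1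
      · rw [if_neg (by simp only [pvIdxOf, pvDirOf]; split_ifs <;> first | omega | simp),
           if_pos (by simp only [pvIdxOf, pvDirOf]; split_ifs <;> first | omega | simp)]
        exact hdir _ _ (by simp only [pvDirOf, hs]; split_ifs <;> first | omega | simp)
                      (by simp only [pvIdxOf, pvDirOf, hs]; split_ifs <;> first | omega | simp)
      · rw [if_neg (by simp only [pvIdxOf, pvDirOf]; split_ifs <;> first | omega | simp),
           if_neg (by simp only [pvIdxOf, pvDirOf]; split_ifs <;> first | omega | simp)]
        exact hdir _ _ (by simp only [pvDirOf, hs]; split_ifs <;> first | omega | simp)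
                      (by simp only [pvIdxOf, pvDirOf, hs]; split_ifs <;> first | omega | simp)
    · by_cases h2 : i % (2 * n.toNat) + 1 = 2 * n.toNat
      · have hs : (i + 1) % (2 * n.toNat) = 0 := by rw [hsucc, if_pos h2]
        rw [if_pos (by simp only [pvIdxOf, pvDirOf]; split_ifs <;> first | omega | simp)]
        exact hdir _ _ (by simp only [pvDirOf, hs]; split_ifs <;> first | omega | simp)
                      (by simp only [pvIdxOf, pvDirOf, hs]; split_ifs <;> first | omega | simp)
      · have hs : (i + 1) % (2 * n.toNat) = i % (2 * n.toNat) + 1 := by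
          rw [hsucc, if_neg h2]
        rw [if_neg (by simp only [pvIdxOf, pvDirOf]; split_ifs <;> first | omega | simp),
           if_neg (by simp only [pvIdxOf, pvDirOf]; split_ifs <;> first | omega | simp)]
        exact hdir _ _ (by simp only [pvDirOf, hs]; split_ifs <;> first | omega | simp)
                      (by simp only [pvIdxOf, pvDirOf, hs]; split_ifs <;> first | omega | simp)

-- ===== VERDICT (by name: the statement is the Claim_ definition above) =====
theorem snake_algorithm_spec : Claim_equal_snake_algorithm := by
  intro player_ids n _hdom hpre
  unfold Spec_snake_algorithm snake_algorithm snake_algorithm_alt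
  by_cases h0 : n = 0
  · simp [h0]
  rw [if_neg h0, if_neg h0]
  by_cases hn : 1 ≤ n
  · have h := loop_eq n hn (PySem.List.slice player_ids none (some (n * 4))) 0
      ((PySem.List.pyRange 0 n 1).map (fun _ => ([] : List Int)))
    rw [show pvDirOf n 0 = 1 from by unfold pvDirOf; rw [Nat.zero_mod, if_pos (by simpa using hn)],
        show pvIdxOf n 0 = 0 from by unfold pvIdxOf; rw [Nat.zero_mod, if_pos (by simpa using hn)]; simp] at h
    simpa using h
  · -- num_courts < 0: Pre_ forces the truncated player list to be empty, both return []
    have hneg : n < 0 := by omega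
    have hlen : (player_ids.length : Int) + 4 * n ≤ 0 := by
      rcases hpre with h | h
      · omega
      · exact h
    have hk : 0 < (-(n * 4)).toNat := by omega
    have hsl : PySem.List.slice player_ids none (some (n * 4)) = [] := by
      rw [show (n * 4 : Int) = -(((-(n * 4)).toNat : Nat) : Int) from by omega]
      rw [PySem.List.slice_to_neg_natCast _ _ hk]
      rw [Nat.sub_eq_zero_of_le (by omega)]
      exact List.take_zero
    rw [hsl]
    simp [snakeLoopA, snakeLoopB]
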